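-- pv_equiv track=rewrite | github.com/Davidjc13/Cosas | utils/remove_duplicates.py | _minor_difference
-- ===== SOURCE A (Python) =====
-- def _minor_difference(tracked_id_frames, suspected_match_frames):
--     """Retrieve the minor difference using set operations.
--
--     Args:
--         - tracked_id_frames (set(int)): Set containing all frames associated to tracked_id.
--         - suspected_match_frames (set(int)): Set containing all frames associated to possible match.
--
--     Returns:
--         tuple(int,int): Frame associated to first set and associated to second set.
--     """
--
--     unique_tracked_id_frames = tracked_id_frames.difference(suspected_match_frames)
--     unique_suspected_match_frames = suspected_match_frames.difference(
--         tracked_id_frames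
--     )
--
--     filtered_tracked_id_frames = unique_tracked_id_frames
--     filtered_suspected_match_frames = unique_suspected_match_frames
--
--     tracked_id_frame, closest_frame = None, None
--     minimal_distance = float("inf")
--
--     for frame in sorted(filtered_tracked_id_frames):
--
--         for suspected_frame in sorted(filtered_suspected_match_frames):
--
--             distance = abs(frame - suspected_frame)
--
--             if distance < minimal_distance:
--
--                 tracked_id_frame, closest_frame = frame, suspected_frame
--                 minimal_distance = distance
--
--     return tracked_id_frame, closest_frame
-- ===== SOURCE B (Python) =====
-- def _minor_difference(tracked_id_frames, suspected_match_frames):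
--     """Closest pair between the two set differences: sort once, then a single
--     two-pointer merge scan; ties broken by the full (distance, frame, suspected)
--     tuple, which reproduces the smallest-frame-then-smallest-suspected rule."""
--     ua = sorted(tracked_id_frames.difference(suspected_match_frames))
--     ub = sorted(suspected_match_frames.difference(tracked_id_frames))
--     if not ua or not ub:
--         return None, None
--     j = 0
--     best = None
--     for f in ua:
--         while j + 1 < len(ub) and ub[j + 1] <= f:
--             j += 1
--         c1 = (abs(f - ub[j]), f, ub[j])
--         if best is None or c1 < best:
--             best = c1
--         if j + 1 < len(ub):
--             c2 = (abs(f - ub[j + 1]), f, ub[j + 1])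
--             if c2 < best:
--                 best = c2
--     return best[1], best[2]
-- ===== Notes on version B (the rewrite author's own statement) =====
-- stated objective: faster
-- what changed: Replaces the nested scan over both sorted set differences (which re-sorts the inner set on every outer iteration) with a single sort of each side followed by one two-pointer merge scan that only compares each frame with its two sorted neighbours, breaking ties by the full (distance, frame, suspected) tuple.
import Mathlib
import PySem

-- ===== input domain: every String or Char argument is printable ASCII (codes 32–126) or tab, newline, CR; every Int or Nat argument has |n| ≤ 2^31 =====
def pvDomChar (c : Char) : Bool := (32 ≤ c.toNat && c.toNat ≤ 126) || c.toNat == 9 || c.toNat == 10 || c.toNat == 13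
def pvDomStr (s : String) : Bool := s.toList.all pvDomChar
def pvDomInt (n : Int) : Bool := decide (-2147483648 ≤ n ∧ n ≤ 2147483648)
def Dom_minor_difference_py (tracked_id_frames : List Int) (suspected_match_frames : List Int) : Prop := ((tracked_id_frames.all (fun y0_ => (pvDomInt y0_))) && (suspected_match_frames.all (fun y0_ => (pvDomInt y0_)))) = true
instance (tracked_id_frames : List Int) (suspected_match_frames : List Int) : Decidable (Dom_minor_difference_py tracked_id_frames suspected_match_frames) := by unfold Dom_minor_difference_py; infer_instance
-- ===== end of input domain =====

-- B replaces A's nested scan (which re-sorts the inner set every outer iteration) by one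
-- sort of each set difference and a single two-pointer merge scan; return values agree everywhere.

-- ===== PORT A =====
-- Python A: set differences, then for frame in sorted(ua): for sf in sorted(ub):
-- update (tracked_id_frame, closest_frame, minimal_distance) when distance strictly smaller.
-- minimal_distance = float("inf") is modelled as `none` (every real distance is below it).
def minor_difference_py (tracked_id_frames : List Int) (suspected_match_frames : List Int) : Option Int × Option Int :=
  let unique_tracked : List Int := PySem.Set.diff (PySem.Set.ofList tracked_id_frames) suspected_match_frames
  let unique_suspected : List Int := PySem.Set.diff (PySem.Set.ofList suspected_match_frames) tracked_id_frames
  let st :=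
    (PySem.List.sorted unique_tracked (fun x => x) false).foldl (fun st frame =>
      (PySem.List.sorted unique_suspected (fun x => x) false).foldl (fun st2 suspected_frame =>
        let distance : Int := |frame - suspected_frame|
        match st2.2.2 with
        | none => (some frame, some suspected_frame, some distance)
        | some m => if distance < m then (some frame, some suspected_frame, some distance) else st2) st)
      ((none, none, none) : Option Int × Option Int × Option Int)
  (st.1, st.2.1)

-- ===== PORT B =====
-- B-side helpers: Python tuple comparison `c < best` on int triples (lexicographic).
def pvTripLt (c d : Int × Int × Int) : Bool :=
  c.1 < d.1 || (c.1 == d.1 && (c.2.1 < d.2.1 || (c.2.1 == d.2.1 && c.2.2 < d.2.2)))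

-- `if best is None or cand < best: best = cand`
def pvUpd (b : Option (Int × Int × Int)) (c : Int × Int × Int) : Option (Int × Int × Int) :=
  match b with
  | none => some c
  | some b0 => if pvTripLt c b0 then some c else some b0

-- the `while j + 1 < len(ub) and ub[j + 1] <= f: j += 1` loop
def pvAdvance (ub : List Int) (f : Int) (j : Nat) : Nat :=
  if h : j + 1 < ub.length ∧ ub.getD (j + 1) 0 ≤ f then pvAdvance ub f (j + 1) else j
termination_by ub.length - j
decreasing_by omega

def minor_difference_py_alt (tracked_id_frames : List Int) (suspected_match_frames : List Int) : Option Int × Option Int :=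
  let ua := PySem.List.sorted (PySem.Set.diff (PySem.Set.ofList tracked_id_frames) suspected_match_frames) (fun x => x) false
  let ub := PySem.List.sorted (PySem.Set.diff (PySem.Set.ofList suspected_match_frames) tracked_id_frames) (fun x => x) false
  if ua.isEmpty || ub.isEmpty then (none, none)
  else
    let fin := ua.foldl (fun (st : Nat × Option (Int × Int × Int)) f =>
      let j := pvAdvance ub f st.1
      let b1 := pvUpd st.2 (|f - ub.getD j 0|, f, ub.getD j 0)
      let b2 := if j + 1 < ub.length then pvUpd b1 (|f - ub.getD (j + 1) 0|, f, ub.getD (j + 1) 0) else b1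
      (j, b2)) (0, none)
    match fin.2 with
    | some c => (some c.2.1, some c.2.2)
    | none => (none, none)   -- unreachable: ua and ub are nonempty here

-- ===== PRECONDITION & SPEC =====
def Spec_minor_difference_py (tracked_id_frames : List Int) (suspected_match_frames : List Int) (out : Option Int × Option Int) : Prop := out = minor_difference_py_alt tracked_id_frames suspected_match_frames
instance (tracked_id_frames : List Int) (suspected_match_frames : List Int) (out : Option Int × Option Int) : Decidable (Spec_minor_difference_py tracked_id_frames suspected_match_frames out) := by unfold Spec_minor_difference_py; infer_instance

-- ===== CLAIM (what is proved, stated in full; the proofs are below) =====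
def Claim_equal_minor_difference_py : Prop := ∀ (tracked_id_frames : List Int) (suspected_match_frames : List Int), Dom_minor_difference_py tracked_id_frames suspected_match_frames → Spec_minor_difference_py tracked_id_frames suspected_match_frames (minor_difference_py tracked_id_frames suspected_match_frames)

-- ===== LEMMAS AND PROOFS =====

-- the (distance, frame, suspected) key of a pair, and the scan order of A's nested loops
def pvKey (p : Int × Int) : Int × Int × Int := (|p.1 - p.2|, p.1, p.2)

def pvPairLt (p q : Int × Int) : Prop := p.1 < q.1 ∨ (p.1 = q.1 ∧ p.2 < q.2)

def pvProd (ua ub : List Int) : List (Int × Int) := ua.flatMap (fun f => ub.map (fun x => (f, x)))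

def pvBest (L : List (Int × Int)) (b : Option (Int × Int × Int)) : Option (Int × Int × Int) :=
  L.foldl (fun b p => pvUpd b (pvKey p)) b

def pvStepA (st : Option Int × Option Int × Option Int) (p : Int × Int) : Option Int × Option Int × Option Int :=
  match st.2.2 with
  | none => (some p.1, some p.2, some |p.1 - p.2|)
  | some m => if |p.1 - p.2| < m then (some p.1, some p.2, some |p.1 - p.2|) else st

def pvStateOf : Option (Int × Int × Int) → Option Int × Option Int × Option Int
  | none => (none, none, none)
  | some c => (some c.2.1, some c.2.2, some c.1)

-- candidate pairs produced by B's scan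
def pvCands (ub : List Int) : List Int → Nat → List (Int × Int)
  | [], _ => []
  | f :: t, j =>
    let j' := pvAdvance ub f j
    ((f, ub.getD j' 0) :: (if j' + 1 < ub.length then [(f, ub.getD (j' + 1) 0)] else [])) ++ pvCands ub t j'

-- order facts about pvTripLt
theorem pvTripLt_irrefl (a : Int × Int × Int) : pvTripLt a a = false := by
  obtain ⟨a1, a2, a3⟩ := a; simp [pvTripLt]

theorem pvTripLt_total (a b : Int × Int × Int) (h1 : pvTripLt a b = false) (h2 : pvTripLt b a = false) : a = b := by
  obtain ⟨a1, a2, a3⟩ := a; obtain ⟨b1, b2, b3⟩ := b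
  simp [pvTripLt] at h1 h2
  simp only [Prod.mk.injEq]
  omega

theorem pvTripLt_trans (a b c : Int × Int × Int) (h1 : pvTripLt a b = true) (h2 : pvTripLt b c = true) : pvTripLt a c = true := by
  obtain ⟨a1, a2, a3⟩ := a; obtain ⟨b1, b2, b3⟩ := b; obtain ⟨c1, c2, c3⟩ := c
  simp [pvTripLt] at h1 h2 ⊢
  omega

theorem pvTripLt_asymm (a b : Int × Int × Int) (h : pvTripLt a b = true) : pvTripLt b a = false := by
  obtain ⟨a1, a2, a3⟩ := a; obtain ⟨b1, b2, b3⟩ := b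
  simp [pvTripLt] at h ⊢
  omega

-- pvBest facts
theorem pvBest_isSome (L : List (Int × Int)) (c : Int × Int × Int) : ∃ d, pvBest L (some c) = some d := by
  induction L generalizing c with
  | nil => exact ⟨c, rfl⟩
  | cons p L ih =>
    by_cases h : pvTripLt (pvKey p) c = true
    · simpa [pvBest, pvUpd, h] using ih (pvKey p)
    · simpa [pvBest, pvUpd, h] using ih c

theorem pvBest_none_iff (L : List (Int × Int)) : pvBest L none = none ↔ L = [] := by
  cases L with
  | nil => simp [pvBest]
  | cons p L =>
    simp only [List.cons_ne_nil, iff_false]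
    have : pvBest (p :: L) none = pvBest L (some (pvKey p)) := by simp [pvBest, pvUpd]
    rw [this]
    obtain ⟨d, hd⟩ := pvBest_isSome L (pvKey p)
    simp [hd]

theorem pvBest_spec (L : List (Int × Int)) (b : Option (Int × Int × Int)) (c0 : Int × Int × Int)
    (h : pvBest L b = some c0) :
      (∀ p ∈ L, pvTripLt (pvKey p) c0 = false) ∧
      (∀ b0, b = some b0 → pvTripLt b0 c0 = false) ∧
      (c0 ∈ L.map pvKey ∨ b = some c0) := by
  induction L generalizing b with
  | nil =>
    refine ⟨by simp, ?_, Or.inr ?_⟩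
    · intro b0 hb; simp [pvBest] at h; rw [hb] at h
      cases h; exact pvTripLt_irrefl c0
    · simpa [pvBest] using h
  | cons p L ih =>
    have h' : pvBest L (pvUpd b (pvKey p)) = some c0 := by simpa [pvBest] using h
    obtain ⟨hL, hb', hmem⟩ := ih _ h'
    have hkp : pvTripLt (pvKey p) c0 = false := by
      cases b with
      | none => exact hb' _ rfl
      | some b0 =>
        by_cases hc : pvTripLt (pvKey p) b0 = true
        · exact hb' _ (by simp [pvUpd, hc])
        · have hb0 : pvTripLt b0 c0 = false := hb' _ (by simp [pvUpd, hc])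
          rcases Bool.eq_false_or_eq_true (pvTripLt (pvKey p) c0) with ht | hf
          · exfalso
            rcases Bool.eq_false_or_eq_true (pvTripLt b0 (pvKey p)) with ht2 | hf2
            · have h3 := pvTripLt_trans _ _ _ ht2 ht
              rw [h3] at hb0; cases hb0
            · have h3 : b0 = pvKey p := pvTripLt_total _ _ hf2 (by simpa using hc)
              rw [h3] at hb0; rw [hb0] at ht; cases ht
          · exact hf
    refine ⟨?_, ?_, ?_⟩
    · intro q hq
      rcases List.mem_cons.mp hq with rfl | hq
      · exact hkp
      · exact hL q hq
    · intro b0 hb; subst hb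
      by_cases hc : pvTripLt (pvKey p) b0 = true
      · have h1 : pvTripLt (pvKey p) c0 = false := hb' _ (by simp [pvUpd, hc])
        rcases Bool.eq_false_or_eq_true (pvTripLt b0 c0) with ht | hf
        · exfalso
          rcases Bool.eq_false_or_eq_true (pvTripLt c0 (pvKey p)) with ht2 | hf2
          · have h3 := pvTripLt_trans _ _ _ ht ht2
            have h2 := pvTripLt_asymm _ _ hc
            rw [h2] at h3; cases h3
          · have h3 : c0 = pvKey p := pvTripLt_total _ _ hf2 h1
            subst h3
            have h4 := pvTripLt_asymm _ _ hc; rw [h4] at ht; cases ht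
        · exact hf
      · exact hb' _ (by simp [pvUpd, hc])
    · rcases hmem with hm | hm
      · exact Or.inl (by simpa using Or.inr hm)
      · cases b with
        | none =>
          simp [pvUpd] at hm
          exact Or.inl (by simp [hm])
        | some b0 =>
          by_cases hc : pvTripLt (pvKey p) b0 = true
          · simp [pvUpd, hc] at hm
            exact Or.inl (by simp [hm])
          · simp [pvUpd, hc] at hm
            exact Or.inr (by simp [hm])

-- A's nested fold over a pvPairLt-sorted pair list computes pvBest
theorem pvTripLt_key_iff (c : Int × Int × Int) (p : Int × Int)
    (h1 : c.1 = |c.2.1 - c.2.2|) (h2 : pvPairLt (c.2.1, c.2.2) p) :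
    pvTripLt (pvKey p) c = true ↔ |p.1 - p.2| < c.1 := by
  obtain ⟨c1, c2, c3⟩ := c; obtain ⟨p1, p2⟩ := p
  simp only [pvPairLt] at h2
  simp only at h1
  simp [pvTripLt, pvKey]
  omega

theorem foldA_eq (L : List (Int × Int)) (hL : L.Pairwise pvPairLt) (b0 : Option (Int × Int × Int))
    (hOK : ∀ c, b0 = some c → c.1 = |c.2.1 - c.2.2| ∧ ∀ p ∈ L, pvPairLt (c.2.1, c.2.2) p) :
    L.foldl pvStepA (pvStateOf b0) = pvStateOf (pvBest L b0) := by
  induction L generalizing b0 with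
  | nil => rfl
  | cons p L ih =>
    rw [List.pairwise_cons] at hL
    obtain ⟨hp, hL'⟩ := hL
    have hstep : pvStepA (pvStateOf b0) p = pvStateOf (pvUpd b0 (pvKey p)) := by
      cases b0 with
      | none => rfl
      | some c =>
        obtain ⟨h1, h2⟩ := hOK c rfl
        have hiff := pvTripLt_key_iff c p h1 (h2 p List.mem_cons_self)
        by_cases hd : |p.1 - p.2| < c.1
        · have ht : pvTripLt (pvKey p) c = true := hiff.mpr hd
          rw [show pvUpd (some c) (pvKey p) = some (pvKey p) from by simp [pvUpd, ht]]
          simp [pvStepA, hd, pvStateOf, pvKey]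
        · have ht : pvTripLt (pvKey p) c = false := by
            rcases Bool.eq_false_or_eq_true (pvTripLt (pvKey p) c) with ht | hf
            · exact absurd (hiff.mp ht) hd
            · exact hf
          rw [show pvUpd (some c) (pvKey p) = some c from by simp [pvUpd, ht]]
          simp [pvStepA, hd, pvStateOf]
    have hnext : ∀ c, pvUpd b0 (pvKey p) = some c →
        c.1 = |c.2.1 - c.2.2| ∧ ∀ q ∈ L, pvPairLt (c.2.1, c.2.2) q := by
      intro c hc
      cases b0 with
      | none =>
        simp [pvUpd] at hc
        subst hc
        exact ⟨rfl, fun q hq => hp q hq⟩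
      | some b1 =>
        by_cases ht : pvTripLt (pvKey p) b1 = true
        · simp [pvUpd, ht] at hc
          subst hc
          exact ⟨rfl, fun q hq => hp q hq⟩
        · simp [pvUpd, ht] at hc
          subst hc
          obtain ⟨h1, h2⟩ := hOK _ rfl
          exact ⟨h1, fun q hq => h2 q (List.mem_cons_of_mem _ hq)⟩
    calc (p :: L).foldl pvStepA (pvStateOf b0)
        = L.foldl pvStepA (pvStateOf (pvUpd b0 (pvKey p))) := by rw [List.foldl_cons, hstep]
      _ = pvStateOf (pvBest L (pvUpd b0 (pvKey p))) := ih hL' _ hnext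
      _ = pvStateOf (pvBest (p :: L) b0) := rfl

theorem mem_pvProd (ua ub : List Int) (p : Int × Int) : p ∈ pvProd ua ub ↔ p.1 ∈ ua ∧ p.2 ∈ ub := by
  obtain ⟨f, x⟩ := p
  simp only [pvProd, List.mem_flatMap, List.mem_map, Prod.mk.injEq]
  constructor
  · rintro ⟨a, ha, y, hy, rfl, rfl⟩; exact ⟨ha, hy⟩
  · rintro ⟨hf, hx⟩; exact ⟨f, hf, x, hx, rfl, rfl⟩

theorem pvProd_pairwise (ua ub : List Int) (ha : ua.Pairwise (· < ·)) (hb : ub.Pairwise (· < ·)) :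
    (pvProd ua ub).Pairwise pvPairLt := by
  induction ua with
  | nil => simp [pvProd]
  | cons f t ih =>
    rw [List.pairwise_cons] at ha
    obtain ⟨hf, ht⟩ := ha
    have : pvProd (f :: t) ub = ub.map (fun x => (f, x)) ++ pvProd t ub := by
      simp [pvProd]
    rw [this, List.pairwise_append]
    refine ⟨?_, ih ht, ?_⟩
    · rw [List.pairwise_map]
      exact hb.imp (fun h => Or.inr ⟨rfl, h⟩)
    · intro a haa b hbb
      obtain ⟨x, _, rfl⟩ := List.mem_map.mp haa
      have hb1 : b.1 ∈ t := ((mem_pvProd t ub b).mp hbb).1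
      exact Or.inl (hf _ hb1)

-- pvAdvance: basic window facts
theorem pvAdvance_spec (ub : List Int) (f : Int) (j : Nat) (hj : j < ub.length) :
    j ≤ pvAdvance ub f j ∧ pvAdvance ub f j < ub.length ∧
    (pvAdvance ub f j + 1 < ub.length → ¬ ub.getD (pvAdvance ub f j + 1) 0 ≤ f) ∧
    (j < pvAdvance ub f j → ub.getD (pvAdvance ub f j) 0 ≤ f) := by
  fun_induction pvAdvance ub f j with
  | case1 j h ih =>
    obtain ⟨ih1, ih2, ih3, ih4⟩ := ih h.1
    refine ⟨by omega, ih2, ih3, ?_⟩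
    intro _
    rcases Nat.lt_or_ge (j + 1) (pvAdvance ub f (j + 1)) with hlt | hge
    · exact ih4 hlt
    · have : pvAdvance ub f (j + 1) = j + 1 := le_antisymm hge ih1
      rw [this]; exact h.2
  | case2 j h =>
    rw [Decidable.not_and_iff_not_or_not] at h
    refine ⟨le_refl _, hj, ?_, by omega⟩
    intro hlen
    rcases h with h | h
    · omega
    · simpa using h

-- B's fold computes pvBest over the candidate list
def pvStepB (ub : List Int) (st : Nat × Option (Int × Int × Int)) (f : Int) : Nat × Option (Int × Int × Int) :=
  let j := pvAdvance ub f st.1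
  let b1 := pvUpd st.2 (|f - ub.getD j 0|, f, ub.getD j 0)
  let b2 := if j + 1 < ub.length then pvUpd b1 (|f - ub.getD (j + 1) 0|, f, ub.getD (j + 1) 0) else b1
  (j, b2)

theorem pvBest_append (l1 l2 : List (Int × Int)) (b : Option (Int × Int × Int)) :
    pvBest (l1 ++ l2) b = pvBest l2 (pvBest l1 b) := by
  simp [pvBest, List.foldl_append]

theorem foldB_eq (ub : List Int) (ua : List Int) (j : Nat) (b : Option (Int × Int × Int)) :
    (ua.foldl (fun (st : Nat × Option (Int × Int × Int)) f =>
      let j := pvAdvance ub f st.1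
      let b1 := pvUpd st.2 (|f - ub.getD j 0|, f, ub.getD j 0)
      let b2 := if j + 1 < ub.length then pvUpd b1 (|f - ub.getD (j + 1) 0|, f, ub.getD (j + 1) 0) else b1
      (j, b2)) (j, b)).2 = pvBest (pvCands ub ua j) b := by
  show (ua.foldl (pvStepB ub) (j, b)).2 = pvBest (pvCands ub ua j) b
  induction ua generalizing j b with
  | nil => rfl
  | cons f t ih =>
    rw [List.foldl_cons]
    have hstep : pvStepB ub (j, b) f =
        (pvAdvance ub f j,
         pvBest ((f, ub.getD (pvAdvance ub f j) 0) ::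
           (if pvAdvance ub f j + 1 < ub.length then [(f, ub.getD (pvAdvance ub f j + 1) 0)] else [])) b) := by
      by_cases h : pvAdvance ub f j + 1 < ub.length <;>
        simp [pvStepB, pvBest, h, pvKey]
    rw [hstep, ih]
    have hc : pvCands ub (f :: t) j =
        ((f, ub.getD (pvAdvance ub f j) 0) ::
           (if pvAdvance ub f j + 1 < ub.length then [(f, ub.getD (pvAdvance ub f j + 1) 0)] else [])) ++
          pvCands ub t (pvAdvance ub f j) := rfl
    rw [hc, pvBest_append]

theorem pvCands_subset (ub : List Int) : ∀ (ua : List Int) (j : Nat), j < ub.length →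
    ∀ p ∈ pvCands ub ua j, p.1 ∈ ua ∧ p.2 ∈ ub := by
  intro ua
  induction ua with
  | nil => intro j _ p hp; simp [pvCands] at hp
  | cons f t ih =>
    intro j hj p hp
    obtain ⟨h1, h2, h3, h4⟩ := pvAdvance_spec ub f j hj
    have hmemj : ub.getD (pvAdvance ub f j) 0 ∈ ub := by
      rw [List.getD_eq_getElem ub 0 h2]; exact List.getElem_mem h2
    rcases List.mem_append.mp hp with hb | hr
    · rcases List.mem_cons.mp hb with rfl | hb2
      · exact ⟨List.mem_cons_self, hmemj⟩
      · by_cases hl : pvAdvance ub f j + 1 < ub.length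
        · rw [if_pos hl] at hb2
          rcases List.mem_singleton.mp hb2 with rfl
          refine ⟨List.mem_cons_self, ?_⟩
          rw [List.getD_eq_getElem ub 0 hl]; exact List.getElem_mem hl
        · rw [if_neg hl] at hb2; cases hb2
    · obtain ⟨ha, hbb⟩ := ih (pvAdvance ub f j) h2 p hr
      exact ⟨List.mem_cons_of_mem _ ha, hbb⟩

theorem pvCands_ne_nil (ub ua : List Int) (j : Nat) (h : ua ≠ []) : pvCands ub ua j ≠ [] := by
  cases ua with
  | nil => exact absurd rfl h
  | cons f t => simp [pvCands]

-- the geometric fact: a per-frame optimal partner lies in B's two-element window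
theorem nearest_in_window (ub : List Int) (hs : ub.Pairwise (· < ·)) (f : Int) (j' : Nat)
    (hj : j' < ub.length) (hle : ub.getD j' 0 ≤ f ∨ j' = 0)
    (hpost : j' + 1 < ub.length → ¬ ub.getD (j' + 1) 0 ≤ f)
    (x : Int) (hx : x ∈ ub)
    (hopt : ∀ y ∈ ub, pvTripLt (pvKey (f, y)) (pvKey (f, x)) = false) :
    x = ub.getD j' 0 ∨ (j' + 1 < ub.length ∧ x = ub.getD (j' + 1) 0) := by
  have hmono : ∀ (a b : Nat) (ha : a < ub.length) (hb : b < ub.length), a < b → ub[a] < ub[b] :=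
    fun a b ha hb hab => List.pairwise_iff_getElem.mp hs a b ha hb hab
  obtain ⟨i, hi, rfl⟩ := List.mem_iff_getElem.mp hx
  have hoptk : ∀ (k : Nat) (hk : k < ub.length),
      pvTripLt (pvKey (f, ub[k])) (pvKey (f, ub[i])) = false :=
    fun k hk => hopt _ (List.getElem_mem hk)
  rw [List.getD_eq_getElem ub 0 hj] at hle
  have hpost' : ∀ _ : j' + 1 < ub.length, f < ub[j' + 1] := by
    intro h
    have h2 := hpost h
    rw [List.getD_eq_getElem ub 0 h] at h2
    omega
  rcases Nat.lt_trichotomy i j' with hij | rfl | hij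
  · -- i < j' : impossible
    exfalso
    have hj0 : ub[j'] ≤ f := by
      rcases hle with h | h
      · exact h
      · omega
    have hlt : ub[i] < ub[j'] := hmono i j' hi hj hij
    have h := hoptk j' hj
    simp only [pvTripLt, pvKey, Int.abs_eq_natAbs] at h
    simp only [Bool.or_eq_false_iff, Bool.and_eq_false_iff, decide_eq_false_iff_not,
      beq_eq_false_iff_ne, ne_eq] at h
    omega
  · exact Or.inl (by rw [List.getD_eq_getElem ub 0 hj])
  · -- i > j'
    have hlen1 : j' + 1 < ub.length := by omega
    rcases Nat.lt_or_ge (j' + 1) i with hii | hii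
    · -- i > j' + 1 : impossible
      exfalso
      have hf1 : f < ub[j' + 1] := hpost' hlen1
      have hlt : ub[j' + 1] < ub[i] := hmono _ _ hlen1 hi hii
      have h := hoptk (j' + 1) hlen1
      simp only [pvTripLt, pvKey, Int.abs_eq_natAbs] at h
      simp only [Bool.or_eq_false_iff, Bool.and_eq_false_iff, decide_eq_false_iff_not,
        beq_eq_false_iff_ne, ne_eq] at h
      omega
    · have : i = j' + 1 := by omega
      subst this
      exact Or.inr ⟨hlen1, by rw [List.getD_eq_getElem ub 0 hlen1]⟩

theorem mem_pvCands (ub : List Int) (hs : ub.Pairwise (· < ·)) :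
    ∀ (ua : List Int) (j : Nat), ua.Pairwise (· < ·) → j < ub.length →
    (∀ f ∈ ua, j = 0 ∨ ub.getD j 0 ≤ f) →
    ∀ fs xs, fs ∈ ua → xs ∈ ub →
    (∀ y ∈ ub, pvTripLt (pvKey (fs, y)) (pvKey (fs, xs)) = false) →
    (fs, xs) ∈ pvCands ub ua j := by
  intro ua
  induction ua with
  | nil => intro j _ _ _ fs xs h; cases h
  | cons f t ih =>
    intro j hpw hj hhyp fs xs hfs hxs hopt
    have hcands : pvCands ub (f :: t) j =
        ((f, ub.getD (pvAdvance ub f j) 0) ::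
           (if pvAdvance ub f j + 1 < ub.length then [(f, ub.getD (pvAdvance ub f j + 1) 0)] else [])) ++
          pvCands ub t (pvAdvance ub f j) := rfl
    obtain ⟨ha1, ha2, ha3, ha4⟩ := pvAdvance_spec ub f j hj
    rw [hcands]
    rcases List.mem_cons.mp hfs with heq | hfs'
    · subst heq
      have hle : ub.getD (pvAdvance ub fs j) 0 ≤ fs ∨ pvAdvance ub fs j = 0 := by
        rcases Nat.lt_or_ge j (pvAdvance ub fs j) with hlt | hge
        · exact Or.inl (ha4 hlt)
        · have hjj : pvAdvance ub fs j = j := le_antisymm hge ha1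
          rcases hhyp fs List.mem_cons_self with h0 | hbl
          · exact Or.inr (by omega)
          · exact Or.inl (by rw [hjj]; exact hbl)
      rcases nearest_in_window ub hs fs (pvAdvance ub fs j) ha2 hle ha3 xs hxs hopt with h | ⟨hl, h⟩
      · subst h
        exact List.mem_append_left _ List.mem_cons_self
      · subst h
        refine List.mem_append_left _ (List.mem_cons_of_mem _ ?_)
        rw [if_pos hl]
        exact List.mem_singleton.mpr rfl
    · rw [List.pairwise_cons] at hpw
      refine List.mem_append_right _ ?_
      refine ih (pvAdvance ub f j) hpw.2 ha2 ?_ fs xs hfs' hxs hopt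
      intro f' hf'
      rcases Nat.lt_or_ge j (pvAdvance ub f j) with hlt | hge
      · right
        have h5 : ub.getD (pvAdvance ub f j) 0 ≤ f := ha4 hlt
        have h6 : f < f' := hpw.1 f' hf'
        omega
      · have hjj : pvAdvance ub f j = j := le_antisymm hge ha1
        rw [hjj]
        exact hhyp f' (List.mem_cons_of_mem _ hf')

-- strictly increasing output of sorted over a set difference
theorem sorted_diff_pairwise_lt (t s : List Int) :
    (PySem.List.sorted (PySem.Set.diff (PySem.Set.ofList t) s) (fun x => x) false).Pairwise (· < ·) := by
  have hnd : (PySem.Set.diff (PySem.Set.ofList t) s).Nodup :=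
    PySem.Set.nodup_diff _ _ (PySem.Set.nodup_ofList t)
  have hp := PySem.List.sorted_pairwise (PySem.Set.diff (PySem.Set.ofList t) s) (fun x => x)
  have hnd2 : (PySem.List.sorted (PySem.Set.diff (PySem.Set.ofList t) s) (fun x => x) false).Nodup :=
    ((PySem.List.sorted_perm _ _ _).nodup_iff).mpr hnd
  exact (hp.and hnd2).imp (fun h => lt_of_le_of_ne h.1 h.2)

-- assembly helpers
def pvRender : Option (Int × Int × Int) → Option Int × Option Int
  | none => (none, none)
  | some c => (some c.2.1, some c.2.2)

theorem pvProd_nil (ua : List Int) : pvProd ua [] = [] := by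
  simp [pvProd]

theorem nested_eq (ua ub : List Int) (init : Option Int × Option Int × Option Int) :
    ua.foldl (fun st frame =>
      ub.foldl (fun st2 suspected_frame =>
        match st2.2.2 with
        | none => (some frame, some suspected_frame, some |frame - suspected_frame|)
        | some m => if |frame - suspected_frame| < m then
            (some frame, some suspected_frame, some |frame - suspected_frame|) else st2) st) init
      = (pvProd ua ub).foldl pvStepA init := by
  simp only [pvProd, List.foldl_flatMap, List.foldl_map]
  rfl

theorem portA_eq (t s : List Int) :
    minor_difference_py t s =
      pvRender (pvBest (pvProd
        (PySem.List.sorted (PySem.Set.diff (PySem.Set.ofList t) s) (fun x => x) false)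
        (PySem.List.sorted (PySem.Set.diff (PySem.Set.ofList s) t) (fun x => x) false)) none) := by
  have hpw := pvProd_pairwise _ _ (sorted_diff_pairwise_lt t s) (sorted_diff_pairwise_lt s t)
  have h := foldA_eq _ hpw none (fun c hc => by cases hc)
  have h' : (pvProd (PySem.List.sorted (PySem.Set.diff (PySem.Set.ofList t) s) (fun x => x) false)
        (PySem.List.sorted (PySem.Set.diff (PySem.Set.ofList s) t) (fun x => x) false)).foldl pvStepA
        ((none, none, none) : Option Int × Option Int × Option Int)
      = pvStateOf (pvBest (pvProd
        (PySem.List.sorted (PySem.Set.diff (PySem.Set.ofList t) s) (fun x => x) false)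
        (PySem.List.sorted (PySem.Set.diff (PySem.Set.ofList s) t) (fun x => x) false)) none) := h
  simp only [minor_difference_py]
  rw [nested_eq, h']
  cases pvBest (pvProd
        (PySem.List.sorted (PySem.Set.diff (PySem.Set.ofList t) s) (fun x => x) false)
        (PySem.List.sorted (PySem.Set.diff (PySem.Set.ofList s) t) (fun x => x) false)) none with
  | none => rfl
  | some c => rfl

-- ===== VERDICT (by name: the statement is the Claim_ definition above) =====
theorem minor_difference_py_spec : Claim_equal_minor_difference_py := by
  unfold Claim_equal_minor_difference_py
  intro t s _
  unfold Spec_minor_difference_py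
  rw [portA_eq]
  by_cases hua : PySem.List.sorted (PySem.Set.diff (PySem.Set.ofList t) s) (fun x => x) false = []
  · rw [hua]
    simp only [minor_difference_py_alt, hua, List.isEmpty_nil, Bool.true_or, if_true]
    rfl
  · by_cases hub : PySem.List.sorted (PySem.Set.diff (PySem.Set.ofList s) t) (fun x => x) false = []
    · rw [hub, pvProd_nil]
      simp only [minor_difference_py_alt, hub, List.isEmpty_nil, Bool.or_true, if_true]
      rfl
    · -- both nonempty
      have hub0 : 0 < (PySem.List.sorted (PySem.Set.diff (PySem.Set.ofList s) t) (fun x => x) false).length :=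
        List.length_pos_of_ne_nil hub
      have hcond : ((PySem.List.sorted (PySem.Set.diff (PySem.Set.ofList t) s) (fun x => x) false).isEmpty ||
          (PySem.List.sorted (PySem.Set.diff (PySem.Set.ofList s) t) (fun x => x) false).isEmpty) = false := by
        simp [hua, hub]
      simp only [minor_difference_py_alt, hcond, Bool.false_eq_true, if_false]
      rw [foldB_eq]
      -- existence of both minima
      have hCne := pvCands_ne_nil
        (PySem.List.sorted (PySem.Set.diff (PySem.Set.ofList s) t) (fun x => x) false)
        (PySem.List.sorted (PySem.Set.diff (PySem.Set.ofList t) s) (fun x => x) false) 0 hua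
      obtain ⟨c', hc'⟩ : ∃ c', pvBest (pvCands
          (PySem.List.sorted (PySem.Set.diff (PySem.Set.ofList s) t) (fun x => x) false)
          (PySem.List.sorted (PySem.Set.diff (PySem.Set.ofList t) s) (fun x => x) false) 0) none = some c' := by
        cases h : pvBest (pvCands _ _ 0) none with
        | none => exact absurd ((pvBest_none_iff _).mp h) hCne
        | some c => exact ⟨c, rfl⟩
      obtain ⟨a0, ha0⟩ := List.exists_mem_of_ne_nil _ hua
      obtain ⟨b0, hb0⟩ := List.exists_mem_of_ne_nil _ hub
      have hPne : pvProd (PySem.List.sorted (PySem.Set.diff (PySem.Set.ofList t) s) (fun x => x) false)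
          (PySem.List.sorted (PySem.Set.diff (PySem.Set.ofList s) t) (fun x => x) false) ≠ [] := by
        intro h0
        have hm := (mem_pvProd _ _ (a0, b0)).mpr ⟨ha0, hb0⟩
        rw [h0] at hm; cases hm
      obtain ⟨cs, hcs⟩ : ∃ cs, pvBest (pvProd
          (PySem.List.sorted (PySem.Set.diff (PySem.Set.ofList t) s) (fun x => x) false)
          (PySem.List.sorted (PySem.Set.diff (PySem.Set.ofList s) t) (fun x => x) false)) none = some cs := by
        cases h : pvBest (pvProd _ _) none with
        | none => exact absurd ((pvBest_none_iff _).mp h) hPne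
        | some c => exact ⟨c, rfl⟩
      rw [hcs, hc']
      suffices hcc : cs = c' by rw [hcc]; rfl
      -- characterizations
      obtain ⟨hminP, -, hmemP⟩ := pvBest_spec _ _ _ hcs
      obtain ⟨hminC, -, hmemC⟩ := pvBest_spec _ _ _ hc'
      have hmemP' : ∃ ps, ps ∈ pvProd
          (PySem.List.sorted (PySem.Set.diff (PySem.Set.ofList t) s) (fun x => x) false)
          (PySem.List.sorted (PySem.Set.diff (PySem.Set.ofList s) t) (fun x => x) false) ∧ cs = pvKey ps := by
        rcases hmemP with h | h
        · obtain ⟨ps, hps, he⟩ := List.mem_map.mp h; exact ⟨ps, hps, he.symm⟩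
        · cases h
      have hmemC' : ∃ pc, pc ∈ pvCands
          (PySem.List.sorted (PySem.Set.diff (PySem.Set.ofList s) t) (fun x => x) false)
          (PySem.List.sorted (PySem.Set.diff (PySem.Set.ofList t) s) (fun x => x) false) 0 ∧ c' = pvKey pc := by
        rcases hmemC with h | h
        · obtain ⟨pc, hpc, he⟩ := List.mem_map.mp h; exact ⟨pc, hpc, he.symm⟩
        · cases h
      obtain ⟨ps, hpsP, hcs_eq⟩ := hmemP'
      obtain ⟨pc, hpcC, hc'_eq⟩ := hmemC'
      obtain ⟨hpsA, hpsB⟩ := (mem_pvProd _ _ ps).mp hpsP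
      -- ps is in B's candidate list
      have hopt : ∀ y ∈ PySem.List.sorted (PySem.Set.diff (PySem.Set.ofList s) t) (fun x => x) false,
          pvTripLt (pvKey (ps.1, y)) (pvKey (ps.1, ps.2)) = false := by
        intro y hy
        have hmem : ((ps.1, y) : Int × Int) ∈ pvProd _ _ := (mem_pvProd _ _ (ps.1, y)).mpr ⟨hpsA, hy⟩
        have h := hminP _ hmem
        have he : pvKey (ps.1, ps.2) = cs := hcs_eq.symm
        rw [he]
        exact h
      have hpsC : ((ps.1, ps.2) : Int × Int) ∈ pvCands
          (PySem.List.sorted (PySem.Set.diff (PySem.Set.ofList s) t) (fun x => x) false)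
          (PySem.List.sorted (PySem.Set.diff (PySem.Set.ofList t) s) (fun x => x) false) 0 :=
        mem_pvCands _ (sorted_diff_pairwise_lt s t) _ 0 (sorted_diff_pairwise_lt t s) hub0
          (fun _ _ => Or.inl rfl) ps.1 ps.2 hpsA hpsB hopt
      have hpcP : pc ∈ pvProd
          (PySem.List.sorted (PySem.Set.diff (PySem.Set.ofList t) s) (fun x => x) false)
          (PySem.List.sorted (PySem.Set.diff (PySem.Set.ofList s) t) (fun x => x) false) := by
        have := pvCands_subset _ _ 0 hub0 pc hpcC
        exact (mem_pvProd _ _ pc).mpr this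
      have h1 : pvTripLt c' cs = false := by rw [hc'_eq]; exact hminP pc hpcP
      have h2 : pvTripLt cs c' = false := by
        rw [hcs_eq]
        exact hminC (ps.1, ps.2) hpsC
      exact (pvTripLt_total _ _ h2 h1)
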